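-- pv_equiv track=rewrite | github.com/Javier200151/ElSorteoDeSQA | project_folder/app/utils.py | calcular_papeletas
-- ===== SOURCE A (Python) =====
-- def calcular_papeletas(jugadores, partidas):
--     resultados = {}
--     for jugador in jugadores:
--         papeletas = 4
--         for partida in partidas:
--             if jugador in partida.get('roles_HQ', []):
--                 papeletas = 0
--                 break
--             if jugador in partida.get('roles_importantes', []):
--                 papeletas -= 1
--         resultados[jugador] = max(papeletas, 0)
--     return resultados
-- ===== SOURCE B (Python) =====
-- def calcular_papeletas(jugadores, partidas):
--     hq = set()
--     imp = {}
--     for partida in partidas: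
--         hq.update(partida.get('roles_HQ', []))
--         for j in set(partida.get('roles_importantes', [])):
--             imp[j] = imp.get(j, 0) + 1
--     return {j: 0 if j in hq else max(4 - imp.get(j, 0), 0) for j in jugadores}
-- ===== Notes on version B (the rewrite author's own statement) =====
-- stated objective: faster
-- what changed: Instead of rescanning every match's role lists for each player (with an early break on HQ), B makes a single pass over the matches building the union set of roles_HQ and a counter of roles_importantes appearances, then computes each player's tickets with O(1) lookups.
import Mathlib
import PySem

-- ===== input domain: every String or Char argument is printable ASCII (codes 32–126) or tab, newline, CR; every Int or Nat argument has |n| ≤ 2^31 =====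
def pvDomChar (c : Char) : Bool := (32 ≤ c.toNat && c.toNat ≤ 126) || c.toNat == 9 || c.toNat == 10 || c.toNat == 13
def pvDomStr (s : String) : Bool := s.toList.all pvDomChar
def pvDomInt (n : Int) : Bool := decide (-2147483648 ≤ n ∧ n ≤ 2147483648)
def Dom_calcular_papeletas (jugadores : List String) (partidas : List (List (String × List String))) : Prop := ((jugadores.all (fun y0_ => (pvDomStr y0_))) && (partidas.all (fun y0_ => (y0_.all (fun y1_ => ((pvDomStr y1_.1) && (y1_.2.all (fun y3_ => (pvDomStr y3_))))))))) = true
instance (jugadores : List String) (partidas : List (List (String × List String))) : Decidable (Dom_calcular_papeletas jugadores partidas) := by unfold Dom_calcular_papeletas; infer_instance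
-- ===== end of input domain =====

-- B replaces A's O(J·P) per-player rescan of all matches by one O(P) pass building the
-- HQ union set and an importantes counter, then an O(1) lookup per player (objective: faster).

-- ===== PORT A =====
-- partida.get(key, [])  (dict lookup with default)
def pvGet (partida : List (String × List String)) (k : String) : List String :=
  PySem.Dict.getD ⟨partida⟩ k []

-- A's inner 'for partida in partidas' loop with its break
def pvALoop (jugador : String) (partidas : List (List (String × List String))) (papeletas : Int) : Int :=
  match partidas with
  | [] => papeletas
  | partida :: rest =>
    if (pvGet partida "roles_HQ").contains jugador then 0
    else if (pvGet partida "roles_importantes").contains jugador then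
      pvALoop jugador rest (papeletas - 1)
    else pvALoop jugador rest papeletas

def calcular_papeletas (jugadores : List String) (partidas : List (List (String × List String))) : List (String × Int) :=
  (jugadores.foldl
    (fun (resultados : PySem.Dict String Int) jugador =>
      resultados.insert jugador (max (pvALoop jugador partidas 4) 0))
    PySem.Dict.empty).items

-- ===== PORT B =====
-- one pass over partidas: hq = union of roles_HQ, imp = per-player count of matches with that player in roles_importantes
def pvBAcc (partidas : List (List (String × List String))) : PySem.Set String × PySem.Dict String Int :=
  partidas.foldl
    (fun acc partida =>
      (PySem.Set.update acc.1 (pvGet partida "roles_HQ"),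
       (PySem.Set.ofList (pvGet partida "roles_importantes")).foldl
         (fun d j => d.modify j 0 (· + 1)) acc.2))
    (PySem.Set.empty, PySem.Dict.empty)

def calcular_papeletas_alt (jugadores : List String) (partidas : List (List (String × List String))) : List (String × Int) :=
  let acc := pvBAcc partidas
  (jugadores.foldl
    (fun (d : PySem.Dict String Int) j =>
      d.insert j (if acc.1.contains j then 0 else max (4 - acc.2.getD j 0) 0))
    PySem.Dict.empty).items

-- ===== PRECONDITION & SPEC =====
def Spec_calcular_papeletas (jugadores : List String) (partidas : List (List (String × List String))) (out : List (String × Int)) : Prop := out = calcular_papeletas_alt jugadores partidas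
instance (jugadores : List String) (partidas : List (List (String × List String))) (out : List (String × Int)) : Decidable (Spec_calcular_papeletas jugadores partidas out) := by unfold Spec_calcular_papeletas; infer_instance

-- ===== CLAIM (what is proved, stated in full; the proofs are below) =====
def Claim_equal_calcular_papeletas : Prop := ∀ (jugadores : List String) (partidas : List (List (String × List String))), Dom_calcular_papeletas jugadores partidas → Spec_calcular_papeletas jugadores partidas (calcular_papeletas jugadores partidas)

-- ===== LEMMAS AND PROOFS =====

-- first component of B's accumulator: union of all roles_HQ lists
lemma pvBAcc_fst_mem (partidas : List (List (String × List String)))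
    (s : PySem.Set String) (d : PySem.Dict String Int) (j : String) :
    (j ∈ (partidas.foldl
      (fun acc partida =>
        (PySem.Set.update acc.1 (pvGet partida "roles_HQ"),
         (PySem.Set.ofList (pvGet partida "roles_importantes")).foldl
           (fun d j => d.modify j 0 (· + 1)) acc.2)) (s, d)).1)
      ↔ (j ∈ s ∨ ∃ p ∈ partidas, j ∈ pvGet p "roles_HQ") := by
  induction partidas generalizing s d with
  | nil => simp
  | cons p rest ih =>
    simp only [List.foldl_cons, ih, PySem.Set.mem_update, List.mem_cons]
    constructor
    · rintro ((h | h) | ⟨q, hq, hj⟩)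
      · exact Or.inl h
      · exact Or.inr ⟨p, Or.inl rfl, h⟩
      · exact Or.inr ⟨q, Or.inr hq, hj⟩
    · rintro (h | ⟨q, (rfl | hq), hj⟩)
      · exact Or.inl (Or.inl h)
      · exact Or.inl (Or.inr hj)
      · exact Or.inr ⟨q, hq, hj⟩

-- second component of B's accumulator: counts matches whose roles_importantes contain j
lemma pvBAcc_snd_getD (partidas : List (List (String × List String)))
    (s : PySem.Set String) (d : PySem.Dict String Int) (j : String) :
    ((partidas.foldl
      (fun acc partida =>
        (PySem.Set.update acc.1 (pvGet partida "roles_HQ"),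
         (PySem.Set.ofList (pvGet partida "roles_importantes")).foldl
           (fun d j => d.modify j 0 (· + 1)) acc.2)) (s, d)).2).getD j 0
      = d.getD j 0 + (partidas.countP (fun p => decide (j ∈ pvGet p "roles_importantes")) : Int) := by
  induction partidas generalizing s d with
  | nil => simp
  | cons p rest ih =>
    simp only [List.foldl_cons, ih, List.countP_cons]
    rw [PySem.Dict.getD_foldl_modify_add_one]
    have hcount : (PySem.Set.ofList (pvGet p "roles_importantes")).count j
        = if j ∈ pvGet p "roles_importantes" then 1 else 0 := by
      by_cases h : j ∈ pvGet p "roles_importantes"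
      · rw [if_pos h]
        exact Nat.le_antisymm
          (List.nodup_iff_count_le_one.mp (PySem.Set.nodup_ofList _) j)
          (List.count_pos_iff.mpr ((PySem.Set.mem_ofList _ _).mpr h))
      · rw [if_neg h, List.count_eq_zero]
        simpa [PySem.Set.mem_ofList] using h
    rw [hcount]
    by_cases h : j ∈ pvGet p "roles_importantes"
    · simp [h]
      ring
    · simp [h]

-- A's loop when some match puts j in roles_HQ
lemma pvALoop_hq (j : String) (partidas : List (List (String × List String))) (x : Int)
    (h : ∃ p ∈ partidas, j ∈ pvGet p "roles_HQ") : pvALoop j partidas x = 0 := by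
  induction partidas generalizing x with
  | nil => simp at h
  | cons p rest ih =>
    obtain ⟨q, hq, hj⟩ := h
    rcases List.mem_cons.mp hq with rfl | hq'
    · simp only [pvALoop]
      rw [if_pos (by simpa using hj)]
    · simp only [pvALoop]
      split_ifs with h1 h2
      · rfl
      · exact ih _ ⟨q, hq', hj⟩
      · exact ih _ ⟨q, hq', hj⟩

-- A's loop when no match puts j in roles_HQ
lemma pvALoop_nohq (j : String) (partidas : List (List (String × List String))) (x : Int)
    (h : ∀ p ∈ partidas, j ∉ pvGet p "roles_HQ") :
    pvALoop j partidas x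
      = x - (partidas.countP (fun p => decide (j ∈ pvGet p "roles_importantes")) : Int) := by
  induction partidas generalizing x with
  | nil => simp [pvALoop]
  | cons p rest ih =>
    simp only [pvALoop, List.countP_cons]
    rw [if_neg (by simpa using h p (List.mem_cons_self ..))]
    have hrest : ∀ q ∈ rest, j ∉ pvGet q "roles_HQ" :=
      fun q hq => h q (List.mem_cons_of_mem _ hq)
    by_cases hi : j ∈ pvGet p "roles_importantes"
    · rw [if_pos (by simpa using hi), ih _ hrest]
      simp [hi]; ring
    · rw [if_neg (by simpa using hi), ih _ hrest]
      simp [hi]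

-- per-player values of A and B coincide
lemma pv_value_eq (partidas : List (List (String × List String))) (j : String) :
    max (pvALoop j partidas 4) 0
      = (if (pvBAcc partidas).1.contains j then 0
         else max (4 - (pvBAcc partidas).2.getD j 0) 0) := by
  unfold pvBAcc
  by_cases h : ∃ p ∈ partidas, j ∈ pvGet p "roles_HQ"
  · rw [pvALoop_hq j partidas 4 h,
      if_pos ((PySem.Set.contains_iff _ _).mpr
        ((pvBAcc_fst_mem partidas _ _ j).mpr (Or.inr h)))]
    simp
  · push Not at h
    rw [pvALoop_nohq j partidas 4 h]
    rw [if_neg (by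
      intro hc
      rcases (pvBAcc_fst_mem partidas _ _ j).mp ((PySem.Set.contains_iff _ _).mp hc) with h' | ⟨p, hp, hj⟩
      · simp [PySem.Set.empty] at h'
      · exact h p hp hj)]
    rw [pvBAcc_snd_getD]
    simp [PySem.Dict.empty, PySem.Dict.getD, PySem.Dict.get?]

-- ===== VERDICT (by name: the statement is the Claim_ definition above) =====
theorem calcular_papeletas_spec : Claim_equal_calcular_papeletas := by
  intro jugadores partidas _hdom
  show _ = _
  unfold calcular_papeletas calcular_papeletas_alt
  have hf : (fun (resultados : PySem.Dict String Int) jugador =>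
      resultados.insert jugador (max (pvALoop jugador partidas 4) 0))
    = (fun (d : PySem.Dict String Int) j =>
      d.insert j (if (pvBAcc partidas).1.contains j then 0
                  else max (4 - (pvBAcc partidas).2.getD j 0) 0)) := by
    funext d j
    rw [pv_value_eq]
  rw [hf]
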